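-- pv_equiv track=rewrite | github.com/alonShevach/introduction-to-CS | ex8/ex8.py | return_k_subsets
-- ===== SOURCE A (Python) =====
-- def return_k_subsets(n, k):
--     """
--     a function that does the k_subsets of n in length k,
--     but this time not passing any list to the other functions of the recursion
--     :param n: range to go on
--     :param k: length of list
--     :return: the list of lists, according to the k_subset rules.
--     """
--     if k == 0:
--         return [[]]
--     if k <= n:
--         temporary_lst = return_k_subsets_helper(n, k, 0)
--         results = []
--         # gives only the lists in length k.
--         for lst in temporary_lst:
--             if len(lst) == k:
--                 results.append(lst)
--         return results
--     else:
--         return []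
--
-- def return_k_subsets_helper(n, k, picked):
--     """
--     a function that uses recursion for giving the k_subset without
--     having a list as an argument.
--     :param n: range to go on
--     :param k: length of lists in the list
--     :param picked: the object we have already picked.
--     :return: the list of k_subset, but not in the length of k.
--     """
--     if picked == k:
--         return [[]]
--     res = []
--     for i in range(n):
--         temporary_lst = return_k_subsets_helper(n, k, picked+1)
--         for lst in temporary_lst:
--             if lst and i <= lst[-1]:
--                 continue
--             lst.append(i)
--         res += temporary_lst
--     return res
-- ===== SOURCE B (Python) =====
-- def return_k_subsets(n, k):
--     # Direct recursive generation of k-combinations of range(n) in colex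
--     # (largest-element-last) order; for negative k we generate nothing.
--     if k < 0:
--         return []
--     return _colex(n, k)
--
-- def _colex(n, k):
--     """All strictly increasing k-lists over range(n), grouped by last element."""
--     if k == 0:
--         return [[]]
--     if k > n:
--         return []
--     out = []
--     for m in range(n):
--         for c in _colex(m, k - 1):
--             out.append(c + [m])
--     return out
-- ===== Notes on version B (the rewrite author's own statement) =====
-- stated objective: alternative
-- what changed: Replaces A's generate-all-length-<=k-sequences-and-filter recursion by a direct recursion that builds exactly the strictly increasing k-lists of range(n) grouped by largest element (colex order), so no over-generation and no filtering pass.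
import Mathlib
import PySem

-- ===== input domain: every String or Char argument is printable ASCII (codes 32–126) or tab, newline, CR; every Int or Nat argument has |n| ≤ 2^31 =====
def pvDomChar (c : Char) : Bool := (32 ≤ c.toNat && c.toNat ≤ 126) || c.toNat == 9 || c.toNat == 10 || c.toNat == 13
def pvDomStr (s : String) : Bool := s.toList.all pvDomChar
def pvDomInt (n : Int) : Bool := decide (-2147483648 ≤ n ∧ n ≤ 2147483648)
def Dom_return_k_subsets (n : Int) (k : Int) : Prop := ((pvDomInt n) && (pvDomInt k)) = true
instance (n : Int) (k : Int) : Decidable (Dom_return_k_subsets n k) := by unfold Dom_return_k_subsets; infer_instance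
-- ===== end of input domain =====

-- B replaces A's generate-all-and-filter recursion by direct colex generation of the
-- k-combinations; same return value on Pre_ (A raises RecursionError outside it).


-- ===== PORT A =====
-- the in-place mutation `if lst and i <= lst[-1]: continue; lst.append(i)` applied to one list;
-- `lst.getLastD 0` is lst[-1], exact under the nonempty guard of the conjunction
def pvExtA (i : Int) (lst : List Int) : List Int :=
  if lst ≠ [] ∧ i ≤ lst.getLastD 0 then lst else lst ++ [i]

-- return_k_subsets_helper(n, k, picked): picked only enters through k - picked, which we carry
-- as the Nat gap (the helper is only reached with 0 < k ≤ n, where gap = k - picked ≥ 0)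
def pvHelperA (n : Int) : Nat → List (List Int)
  | 0 => [[]]
  | g + 1 =>
      (PySem.List.pyRange 0 n 1).foldl
        (fun res i => res ++ (pvHelperA n g).map (pvExtA i)) []

def return_k_subsets (n : Int) (k : Int) : List (List Int) :=
  if k = 0 then [[]]
  else if k ≤ n then
    (pvHelperA n k.toNat).foldl
      (fun results lst => if (lst.length : Int) = k then results ++ [lst] else results) []
  else []

-- ===== PORT B =====
-- _colex(n, k): all strictly increasing k-lists over range(n), grouped by last element;
-- k is a Nat here because B's wrapper guard `k < 0` ensures _colex is only called with k ≥ 0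
def pvColexB : Int → Nat → List (List Int)
  | _, 0 => [[]]
  | n, g + 1 =>
      if n < (g : Int) + 1 then []  -- `if k > n: return []`
      else
        (PySem.List.pyRange 0 n 1).foldl
          (fun out m => (pvColexB m g).foldl (fun out c => out ++ [c ++ [m]]) out) []
  termination_by _n g => g

def return_k_subsets_alt (n : Int) (k : Int) : List (List Int) :=
  if k < 0 then [] else pvColexB n k.toNat

-- ===== PRECONDITION & SPEC =====
-- Pre_ excludes exactly the inputs with k < 0 ∧ k ≤ n ∧ 0 < n, on which A's helper
-- recurses without bound and Python A raises RecursionError (A returns nothing there).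
def Pre_return_k_subsets (n : Int) (k : Int) : Prop := 0 ≤ k ∨ n < k ∨ n ≤ 0
instance (n : Int) (k : Int) : Decidable (Pre_return_k_subsets n k) := by
  unfold Pre_return_k_subsets; infer_instance

def pvWitness_return_k_subsets : Int × Int := (4, 2)

def Spec_return_k_subsets (n : Int) (k : Int) (out : List (List Int)) : Prop :=
  out = return_k_subsets_alt n k
instance (n : Int) (k : Int) (out : List (List Int)) : Decidable (Spec_return_k_subsets n k out) := by
  unfold Spec_return_k_subsets; infer_instance

-- ===== CLAIM (what is proved, stated in full; the proofs are below) =====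
def Claim_equal_return_k_subsets : Prop :=
  ∀ (n : Int) (k : Int), Dom_return_k_subsets n k → Pre_return_k_subsets n k →
    Spec_return_k_subsets n k (return_k_subsets n k)

-- ===== LEMMAS AND PROOFS =====

lemma pvHelperA_succ (n : Int) (g : Nat) :
    pvHelperA n (g + 1)
      = (PySem.List.pyRange 0 n 1).flatMap (fun i => (pvHelperA n g).map (pvExtA i)) := by
  simp only [pvHelperA]
  exact List.flatMap_eq_foldl.symm

lemma pvColexB_succ (n : Int) (g : Nat) :
    pvColexB n (g + 1)
      = (PySem.List.pyRange 0 n 1).flatMap (fun m => (pvColexB m g).map (fun c => c ++ [m])) := by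
  rw [pvColexB]
  split_ifs with hg
  · symm
    rw [List.flatMap_eq_nil_iff]
    intro m hm
    have hmr := PySem.List.mem_pyRange_one.mp hm
    cases g with
    | zero => exfalso; omega
    | succ g' =>
      rw [pvColexB, if_pos (show m < (g' : Int) + 1 by push_cast at hg ⊢; omega)]
      simp
  · have h1 : (fun (out : List (List Int)) (m : Int) =>
          (pvColexB m g).foldl (fun out c => out ++ [c ++ [m]]) out)
        = fun out m => out ++ (pvColexB m g).map (fun c => c ++ [m]) := by
      funext out m
      exact PySem.List.foldl_append_singleton_eq_map _ _ _
    rw [h1]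
    exact List.flatMap_eq_foldl.symm

lemma pvHelperA_len {g : Nat} {n : Int} {l : List Int} (h : l ∈ pvHelperA n g) :
    l.length ≤ g := by
  induction g generalizing l with
  | zero => simp [pvHelperA] at h; simp [h]
  | succ g ih =>
    rw [pvHelperA_succ] at h
    simp only [List.mem_flatMap, List.mem_map] at h
    obtain ⟨i, -, l', hl', rfl⟩ := h
    have hl'' := ih hl'
    unfold pvExtA
    split_ifs <;> simp <;> omega

lemma pvHelperA_lt {g : Nat} {n : Int} {l : List Int} (h : l ∈ pvHelperA n g) :
    ∀ x ∈ l, x < n := by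
  induction g generalizing l with
  | zero => simp [pvHelperA] at h; simp [h]
  | succ g ih =>
    rw [pvHelperA_succ] at h
    simp only [List.mem_flatMap, List.mem_map] at h
    obtain ⟨i, hi, l', hl', rfl⟩ := h
    have hin : i < n := (PySem.List.mem_pyRange_one.mp hi).2
    intro x hx
    unfold pvExtA at hx
    split_ifs at hx
    · exact ih hl' x hx
    · rcases List.mem_append.mp hx with h1 | h1
      · exact ih hl' x h1
      · simp at h1; omega

lemma pvMain (g : Nat) : ∀ (n i : Int), i ≤ n →
    (pvHelperA n g).filter
        (fun l => l.length == g && (l.isEmpty || decide (l.getLastD 0 < i)))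
      = pvColexB i g := by
  induction g with
  | zero =>
    intro n i _
    simp [pvHelperA, pvColexB, List.filter]
  | succ g ih =>
    intro n i hin
    rw [pvHelperA_succ, List.filter_flatMap]
    have block : ∀ j ∈ PySem.List.pyRange 0 n 1,
        ((pvHelperA n g).map (pvExtA j)).filter
            (fun l => l.length == g + 1 && (l.isEmpty || decide (l.getLastD 0 < i)))
          = if j < i then (pvColexB j g).map (fun c => c ++ [j]) else [] := by
      intro j hj
      obtain ⟨hj0, hjn⟩ := PySem.List.mem_pyRange_one.mp hj
      rw [List.filter_map]
      by_cases hji : j < i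
      · rw [if_pos hji]
        have hQ : (pvHelperA n g).filter
              ((fun l => l.length == g + 1 && (l.isEmpty || decide (l.getLastD 0 < i))) ∘ pvExtA j)
            = (pvHelperA n g).filter
              (fun l => l.length == g && (l.isEmpty || decide (l.getLastD 0 < j))) := by
          apply List.filter_congr
          intro l hl
          have hlen := pvHelperA_len hl
          simp only [Function.comp_apply, pvExtA]
          split_ifs with hc
          · obtain ⟨hne, hge⟩ := hc
            have h1 : (l.length == g + 1) = false := by
              rw [beq_eq_false_iff_ne]
              omega
            have h2 : l.isEmpty = false := by
              rw [List.isEmpty_eq_false_iff]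
              exact hne
            have h3 : decide (l.getLastD 0 < j) = false := by
              rw [decide_eq_false_iff_not]
              omega
            rw [h1, h2, h3]
            simp only [Bool.false_and, Bool.false_or, Bool.and_false]
          · have h4 : (l ++ [j]).getLastD 0 = j := List.getLastD_concat
            have h6 : ((l ++ [j]).length == g + 1) = (l.length == g) := by
              have hlen1 : (l ++ [j]).length = l.length + 1 := by simp
              rw [hlen1]
              by_cases hd : l.length = g
              · rw [hd, beq_self_eq_true, beq_self_eq_true]
              · rw [beq_eq_false_iff_ne.mpr (show l.length + 1 ≠ g + 1 by omega),
                    beq_eq_false_iff_ne.mpr hd]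
            have h7 : (l.isEmpty || decide (l.getLastD 0 < j)) = true := by
              rcases not_and_or.mp hc with h | h
              · rw [not_not.mp h]
                rfl
              · have hlt : l.getLastD 0 < j := by omega
                rw [decide_eq_true hlt, Bool.or_true]
            rw [h4, h6, h7]
            rw [decide_eq_true hji]
            simp only [Bool.or_true, Bool.and_true]
        rw [hQ]
        have hmc : ((pvHelperA n g).filter
              (fun l => l.length == g && (l.isEmpty || decide (l.getLastD 0 < j)))).map (pvExtA j)
            = ((pvHelperA n g).filter
              (fun l => l.length == g && (l.isEmpty || decide (l.getLastD 0 < j)))).map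
              (fun c => c ++ [j]) := by
          apply List.map_congr_left
          intro l hl
          have hQl := List.of_mem_filter hl
          rw [Bool.and_eq_true, Bool.or_eq_true] at hQl
          unfold pvExtA
          rw [if_neg]
          intro hcon
          rcases hQl.2 with h | h
          · exact hcon.1 (List.isEmpty_iff.mp h)
          · have := of_decide_eq_true h
            have := hcon.2
            omega
        rw [hmc, ih n j (le_of_lt hjn)]
      · rw [if_neg hji]
        have hnil : (pvHelperA n g).filter
            ((fun l => l.length == g + 1 && (l.isEmpty || decide (l.getLastD 0 < i))) ∘ pvExtA j)
              = [] := by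
          rw [List.filter_eq_nil_iff]
          intro l hl
          have hlen := pvHelperA_len hl
          simp only [Function.comp_apply, pvExtA]
          split_ifs with hc
          · intro hcon
            rw [Bool.and_eq_true, beq_iff_eq] at hcon
            omega
          · intro hcon
            rw [Bool.and_eq_true, Bool.or_eq_true] at hcon
            rcases hcon.2 with h | h
            · exact absurd (List.isEmpty_iff.mp h) (by simp)
            · have := of_decide_eq_true h
              rw [List.getLastD_concat] at this
              exact hji this
        rw [hnil, List.map_nil]
    rw [List.flatMap_congr block, pvColexB_succ]
    by_cases h0 : 0 ≤ i
    · rw [PySem.List.pyRange_one_append 0 i n h0 hin, List.flatMap_append]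
      have h2 : (PySem.List.pyRange i n 1).flatMap
          (fun j => if j < i then (pvColexB j g).map (fun c => c ++ [j]) else []) = [] := by
        rw [List.flatMap_eq_nil_iff]
        intro j hj
        rw [if_neg (by have := PySem.List.mem_pyRange_one.mp hj; omega)]
      have h1 : (PySem.List.pyRange 0 i 1).flatMap
            (fun j => if j < i then (pvColexB j g).map (fun c => c ++ [j]) else [])
          = (PySem.List.pyRange 0 i 1).flatMap
            (fun j => (pvColexB j g).map (fun c => c ++ [j])) := by
        apply List.flatMap_congr
        intro j hj
        rw [if_pos (PySem.List.mem_pyRange_one.mp hj).2]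
      rw [h1, h2, List.append_nil]
    · rw [PySem.List.pyRange_one_eq_nil (show i ≤ 0 by omega)]
      have hall : ∀ j ∈ PySem.List.pyRange 0 n 1,
          (if j < i then (pvColexB j g).map (fun c => c ++ [j]) else []) = [] := by
        intro j hj
        exact if_neg (by have := PySem.List.mem_pyRange_one.mp hj; omega)
      rw [List.flatMap_eq_nil_iff.mpr hall]
      simp

lemma pvColexB_nil (g : Nat) : ∀ (n : Int), n < (g : Int) + 1 → pvColexB n (g + 1) = [] := by
  intro n h
  rw [pvColexB, if_pos h]

-- ===== VERDICT (by name: the statement is the Claim_ definition above) =====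
theorem return_k_subsets_spec : Claim_equal_return_k_subsets := by
  intro n k _ _
  unfold Spec_return_k_subsets return_k_subsets return_k_subsets_alt
  by_cases hk0 : k = 0
  · subst hk0
    norm_num
    simp [pvColexB]
  · rw [if_neg hk0]
    by_cases hkn : k ≤ n
    · rw [if_pos hkn]
      by_cases hkneg : k < 0
      · -- k < 0 (A's filter keeps nothing of pvHelperA n 0 = [[]]); B's guard returns []
        rw [if_pos hkneg, show k.toNat = 0 from by omega]
        simp only [pvHelperA, List.foldl_cons, List.foldl_nil, List.length_nil,
          Nat.cast_zero]
        rw [if_neg (show ¬ (0 : Int) = k by omega)]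
      · have hkpos : 0 < k := by omega
        rw [if_neg hkneg]
        have hfun : (fun (results : List (List Int)) (lst : List Int) =>
              if (lst.length : Int) = k then results ++ [lst] else results)
            = fun results lst =>
              if (fun l : List Int => decide ((l.length : Int) = k)) lst = true
              then results ++ [id lst] else results := by
          funext r l
          simp
        rw [hfun, PySem.List.foldl_append_if]
        rw [List.map_id, List.nil_append]
        have hfc : (pvHelperA n k.toNat).filter (fun l => decide ((l.length : Int) = k))
            = (pvHelperA n k.toNat).filter
              (fun l => l.length == k.toNat && (l.isEmpty || decide (l.getLastD 0 < n))) := by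
          apply List.filter_congr
          intro l hl
          by_cases hleq : l.length = k.toNat
          · have hne : l ≠ [] := by
              intro hcon
              subst hcon
              simp at hleq
              omega
            have hlast : l.getLastD 0 < n := by
              have hmem : l.getLastD 0 ∈ l := by
                rw [List.getLastD_eq_getLast?]
                cases hl? : l.getLast? with
                | none => exact absurd (List.getLast?_eq_none_iff.mp hl?) hne
                | some x => simpa using List.mem_of_getLast? hl?
              exact pvHelperA_lt hl _ hmem
            have hInt : ((l.length : Int) = k) := by omega
            rw [decide_eq_true hInt, beq_iff_eq.mpr hleq, decide_eq_true hlast]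
            simp only [Bool.or_true, Bool.and_true]
          · have hInt : ¬ ((l.length : Int) = k) := by omega
            rw [decide_eq_false hInt, beq_eq_false_iff_ne.mpr hleq, Bool.false_and]
        rw [hfc, pvMain k.toNat n n le_rfl]
    · rw [if_neg hkn]
      by_cases hkneg : k < 0
      · rw [if_pos hkneg]
      · rw [if_neg hkneg]
        obtain ⟨g, hg⟩ : ∃ g, k.toNat = g + 1 := ⟨k.toNat - 1, by omega⟩
        rw [hg, pvColexB_nil g n (by omega)]
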